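-- pv_equiv track=rewrite | github.com/matetern555/SORR | app/services/deepgram_diarization.py | map_speakers
-- ===== SOURCE A (Python) =====
-- from typing import List, Dict, BinaryIO
--
-- def map_speakers(segments: List[Dict]) -> List[Dict]:
--     """
--     Mapuje SPEAKER_0, SPEAKER_1 na KONSULTANT, KLIENT.
--
--     Args:
--         segments: Lista segmentów z SPEAKER_0, SPEAKER_1
--
--     Returns:
--         List[Dict]: Lista segmentów z KONSULTANT, KLIENT
--     """
--     mapped_segments = []
--     speaker_mapping = {}
--     speaker_counter = 0
--
--     for segment in segments:
--         speaker = segment["speaker_label"]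
--
--         if speaker not in speaker_mapping:
--             if speaker_counter == 0:
--                 speaker_mapping[speaker] = "KONSULTANT"
--             else:
--                 speaker_mapping[speaker] = "KLIENT"
--             speaker_counter += 1
--
--         mapped_segment = segment.copy()
--         mapped_segment["speaker_label"] = speaker_mapping[speaker]
--         mapped_segments.append(mapped_segment)
--
--     return mapped_segments
-- ===== SOURCE B (Python) =====
-- def map_speakers(segments):
--     """Staged pipeline instead of A's single stateful loop: pass 1 dedups the
--     speaker labels in first-seen order, a role table is built by zipping that
--     order with KONSULTANT followed by KLIENTs, pass 2 rewrites each segment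
--     through the table."""
--     order = list(dict.fromkeys(segment["speaker_label"] for segment in segments))
--     roles = ["KONSULTANT"] + ["KLIENT"] * (len(order) - 1)
--     table = dict(zip(order, roles))
--     return [{**segment, "speaker_label": table[segment["speaker_label"]]}
--             for segment in segments]
-- ===== Notes on version B (the rewrite author's own statement) =====
-- stated objective: alternative
-- what changed: Replaces A's single stateful loop (a speaker_mapping dict and a counter mutated while emitting segments) by a staged pipeline: dedup the speaker labels in first-seen order with dict.fromkeys, build the role table by zipping that order with a precomputed KONSULTANT/KLIENT role list, then map the segments through the table in a comprehension.
import Mathlib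
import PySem

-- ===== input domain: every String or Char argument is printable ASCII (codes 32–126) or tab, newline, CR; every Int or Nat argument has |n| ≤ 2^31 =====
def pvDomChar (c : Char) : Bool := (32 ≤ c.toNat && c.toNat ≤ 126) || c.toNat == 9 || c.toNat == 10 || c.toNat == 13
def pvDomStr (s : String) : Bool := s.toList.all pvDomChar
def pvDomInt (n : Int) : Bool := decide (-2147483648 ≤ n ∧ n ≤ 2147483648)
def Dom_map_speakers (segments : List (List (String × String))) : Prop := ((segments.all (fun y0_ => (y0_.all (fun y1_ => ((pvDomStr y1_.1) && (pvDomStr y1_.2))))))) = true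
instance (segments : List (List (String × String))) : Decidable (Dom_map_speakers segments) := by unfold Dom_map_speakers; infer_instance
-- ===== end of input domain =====

-- B replaces A's single stateful loop (mapping dict + counter mutated per segment) by a
-- staged pipeline: dedup the labels, zip with a precomputed role list, then map (objective: alternative).

-- ===== PORT A =====
-- A's loop state: (mapped_segments, speaker_mapping, speaker_counter).
def mapSpeakersStepA (st : List (List (String × String)) × PySem.Dict String String × Int)
    (segment : List (String × String)) :
    List (List (String × String)) × PySem.Dict String String × Int :=
  let segd := PySem.Dict.ofList segment
  -- segment["speaker_label"]: KeyError (excluded by Pre_) when the key is absent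
  let speaker := segd.getD "speaker_label" ""
  let (mapping, counter) :=
    if st.2.1.contains speaker = false then
      (if st.2.2 == 0 then st.2.1.insert speaker "KONSULTANT"
       else st.2.1.insert speaker "KLIENT", st.2.2 + 1)
    else (st.2.1, st.2.2)
  (st.1 ++ [(segd.insert "speaker_label" (mapping.getD speaker "")).items], mapping, counter)

def map_speakers (segments : List (List (String × String))) : List (List (String × String)) :=
  (segments.foldl mapSpeakersStepA ([], PySem.Dict.empty, 0)).1

-- ===== PORT B =====
-- segment["speaker_label"] (KeyError when absent is excluded by Pre_)
def labelOfB (segment : List (String × String)) : String :=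
  (PySem.Dict.ofList segment).getD "speaker_label" ""

def map_speakers_alt (segments : List (List (String × String))) : List (List (String × String)) :=
  -- order = list(dict.fromkeys(labels))  (PySem.List.dedup = dict.fromkeys ordered dedup)
  let order := PySem.List.dedup (segments.map labelOfB)
  -- roles = ["KONSULTANT"] + ["KLIENT"] * (len(order) - 1)  (Nat '-' matches Python's empty product for len 0)
  let roles := "KONSULTANT" :: List.replicate (order.length - 1) "KLIENT"
  -- table = dict(zip(order, roles))
  let table := PySem.Dict.ofList (order.zip roles)
  -- [{**segment, "speaker_label": table[label]} for segment in segments]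
  segments.map (fun segment =>
    ((PySem.Dict.ofList segment).insert "speaker_label" (table.getD (labelOfB segment) "")).items)

-- ===== PRECONDITION & SPEC =====
-- Pre_ excludes exactly the inputs where A raises KeyError: a segment without "speaker_label".
def Pre_map_speakers (segments : List (List (String × String))) : Prop :=
  ∀ seg ∈ segments, "speaker_label" ∈ seg.map Prod.fst
instance (segments : List (List (String × String))) : Decidable (Pre_map_speakers segments) := by
  unfold Pre_map_speakers; infer_instance

def pvWitness_map_speakers : (List (List (String × String))) :=
  [[("speaker_label", "SPEAKER_0"), ("text", "hi")], [("speaker_label", "SPEAKER_1")]]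

def Spec_map_speakers (segments : List (List (String × String))) (out : List (List (String × String))) : Prop := out = map_speakers_alt segments
instance (segments : List (List (String × String))) (out : List (List (String × String))) : Decidable (Spec_map_speakers segments out) := by unfold Spec_map_speakers; infer_instance

-- ===== CLAIM (what is proved, stated in full; the proofs are below) =====
def Claim_equal_map_speakers : Prop := ∀ (segments : List (List (String × String))), Dom_map_speakers segments → Pre_map_speakers segments → Spec_map_speakers segments (map_speakers segments)

-- ===== LEMMAS AND PROOFS =====

-- Canonical per-segment result both sides are proved equal to: relabel by comparison
-- with the first segment's speaker.
def canonSeg (first : String) (segment : List (String × String)) : List (String × String) :=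
  ((PySem.Dict.ofList segment).insert "speaker_label"
    (if labelOfB segment == first then "KONSULTANT" else "KLIENT")).items

-- ---- A-side: the fold equals map (canonSeg first) ----
theorem foldl_stepA_inv (first : String) :
    ∀ (rest : List (List (String × String))) (acc : List (List (String × String)))
      (m : PySem.Dict String String) (c : Int),
      1 ≤ c →
      m.get? first = some "KONSULTANT" →
      (∀ s v, m.get? s = some v → v = (if s == first then "KONSULTANT" else "KLIENT")) →
      (rest.foldl mapSpeakersStepA (acc, m, c)).1 = acc ++ rest.map (canonSeg first) := by
  intro rest
  induction rest with
  | nil => intro acc m c _ _ _; simp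
  | cons seg rest ih =>
    intro acc m c hc hfirst hall
    have hc0 : (c == 0) = false := by simp only [beq_eq_false_iff_ne]; omega
    simp only [List.foldl_cons, List.map_cons]
    set speaker := (PySem.Dict.ofList seg).getD "speaker_label" "" with hspk
    by_cases hmem : m.contains speaker = false
    · -- new speaker: speaker ≠ first (first is in m), counter ≠ 0 ⇒ KLIENT
      have hne : speaker ≠ first := by
        intro h
        rw [h, PySem.Dict.contains_eq_isSome_get?, hfirst] at hmem
        simp at hmem
      rw [show mapSpeakersStepA (acc, m, c) seg =
          (acc ++ [((PySem.Dict.ofList seg).insert "speaker_label"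
              ((m.insert speaker "KLIENT").getD speaker "")).items],
            m.insert speaker "KLIENT", c + 1) by
        simp [mapSpeakersStepA, ← hspk, hmem, hc0]]
      rw [ih _ _ _ (by omega : (1:Int) ≤ c + 1)
        (by rw [PySem.Dict.get?_insert_of_ne _ _ (Ne.symm hne)]; exact hfirst)
        (by
          intro s v hv
          rcases eq_or_ne s speaker with h | h
          · subst h; rw [PySem.Dict.get?_insert_self] at hv
            simp_all
          · rw [PySem.Dict.get?_insert_of_ne _ _ h] at hv
            exact hall s v hv)]
      have : (m.insert speaker "KLIENT").getD speaker "" = "KLIENT" :=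
        PySem.Dict.getD_insert_self _ _ _ _
      simp [this, canonSeg, labelOfB, ← hspk, hne]
    · -- seen speaker: look it up, value agrees with the canonical rule
      rw [Bool.not_eq_false] at hmem
      have hmem' : m.contains speaker = true := hmem
      obtain ⟨v, hv⟩ : ∃ v, m.get? speaker = some v := by
        rw [PySem.Dict.contains_eq_isSome_get?] at hmem'
        exact Option.isSome_iff_exists.mp hmem'
      rw [show mapSpeakersStepA (acc, m, c) seg =
          (acc ++ [((PySem.Dict.ofList seg).insert "speaker_label" (m.getD speaker "")).items],
            m, c) by
        simp [mapSpeakersStepA, ← hspk, hmem']]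
      rw [ih _ _ _ hc hfirst hall]
      have hvv := hall speaker v hv
      have : m.getD speaker "" = if speaker == first then "KONSULTANT" else "KLIENT" := by
        rw [PySem.Dict.getD_of_get?_eq_some _ _ hv, hvv]
      simp [this, canonSeg, labelOfB, ← hspk]

theorem mapA_eq_canon (s0 : List (String × String)) (rest : List (List (String × String))) :
    map_speakers (s0 :: rest) = (s0 :: rest).map (canonSeg (labelOfB s0)) := by
  unfold map_speakers
  set first := (PySem.Dict.ofList s0).getD "speaker_label" "" with hfirst
  have hfirst' : labelOfB s0 = first := rfl
  simp only [List.foldl_cons, List.map_cons]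
  rw [show mapSpeakersStepA ([], PySem.Dict.empty, 0) s0 =
      ([((PySem.Dict.ofList s0).insert "speaker_label"
          ((PySem.Dict.empty.insert first "KONSULTANT").getD first "")).items],
        PySem.Dict.empty.insert first "KONSULTANT", (1 : Int)) by
    simp [mapSpeakersStepA, PySem.Dict.contains_empty, ← hfirst]]
  rw [foldl_stepA_inv first rest _ _ _ (by norm_num)
    (PySem.Dict.get?_insert_self _ _ _)
    (by
      intro s v hv
      rcases eq_or_ne s first with h | h
      · subst h; rw [PySem.Dict.get?_insert_self] at hv; simp_all
      · rw [PySem.Dict.get?_insert_of_ne _ _ h, PySem.Dict.get?_empty] at hv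
        exact absurd hv (by simp))]
  have : (PySem.Dict.empty.insert first "KONSULTANT").getD first "" = "KONSULTANT" :=
    PySem.Dict.getD_insert_self _ _ _ _
  simp [this, canonSeg, hfirst']

-- ---- B-side: the zip/table lookup agrees with the canonical rule ----

-- Folding inserts whose keys all differ from s leaves the lookup at s unchanged.
theorem getD_foldl_insert_of_not_key (s dflt : String) :
    ∀ (ps : List (String × String)) (d : PySem.Dict String String),
      (∀ p ∈ ps, p.1 ≠ s) →
      (ps.foldl (fun d p => d.insert p.1 p.2) d).getD s dflt = d.getD s dflt := by
  intro ps
  induction ps with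
  | nil => intro d _; rfl
  | cons p ps ih =>
    intro d h
    simp only [List.foldl_cons]
    rw [ih _ (fun q hq => h q (List.mem_cons_of_mem _ hq)),
      PySem.Dict.getD_insert_of_ne _ _ _ (Ne.symm (h p List.mem_cons_self))]

-- Folding inserts of (t, KLIENT) pairs maps every member of t to KLIENT.
theorem getD_foldl_zip_replicate (s dflt : String) :
    ∀ (t : List String) (d : PySem.Dict String String), s ∈ t →
      ((t.zip (List.replicate t.length "KLIENT")).foldl
          (fun d p => d.insert p.1 p.2) d).getD s dflt = "KLIENT" := by
  intro t
  induction t with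
  | nil => intro d h; exact absurd h (List.not_mem_nil)
  | cons x t ih =>
    intro d hs
    simp only [List.length_cons, List.replicate_succ, List.zip_cons_cons, List.foldl_cons]
    by_cases hst : s ∈ t
    · exact ih _ hst
    · have hsx : s = x := by rcases List.mem_cons.mp hs with h | h; exact h; exact absurd h hst
      subst hsx
      rw [getD_foldl_insert_of_not_key _ _ _ _ (by
        intro p hp
        have : p.1 ∈ t := by
          have := List.of_mem_zip hp
          exact this.1
        exact fun h => hst (h ▸ this))]
      exact PySem.Dict.getD_insert_self _ _ _ _

-- The staged pipeline's table lookup is the canonical rule, for labels that occur.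
theorem table_getD (l0 : String) (ls : List String) (s : String) (hs : s ∈ l0 :: ls) :
    (PySem.Dict.ofList ((PySem.List.dedup (l0 :: ls)).zip
        ("KONSULTANT" :: List.replicate ((PySem.List.dedup (l0 :: ls)).length - 1) "KLIENT"))).getD s ""
      = (if s == l0 then "KONSULTANT" else "KLIENT") := by
  obtain ⟨t, ht⟩ : ∃ t, PySem.List.dedup (l0 :: ls) = l0 :: t := by
    have : ∀ (xs : List String) (acc : List String),
        ∃ u, PySem.Set.update acc xs = acc ++ u := by
      intro xs
      induction xs with
      | nil => intro acc; exact ⟨[], by simp [PySem.Set.update]⟩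
      | cons x xs ih =>
        intro acc
        simp only [PySem.Set.update, List.foldl_cons]
        by_cases h : x ∈ acc
        · obtain ⟨u, hu⟩ := ih acc
          simp only [PySem.Set.update] at hu
          refine ⟨u, ?_⟩
          rw [show PySem.Set.add acc x = acc by simp [PySem.Set.add, PySem.Set.contains, h]]
          exact hu
        · obtain ⟨u, hu⟩ := ih (acc ++ [x])
          simp only [PySem.Set.update] at hu
          refine ⟨x :: u, ?_⟩
          rw [show PySem.Set.add acc x = acc ++ [x] by simp [PySem.Set.add, PySem.Set.contains, h]]
          rw [hu]; simp
    obtain ⟨u, hu⟩ := this ls [l0]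
    exact ⟨u, by
      simpa [PySem.List.dedup, PySem.Set.ofList, PySem.Set.update, PySem.Set.add] using hu⟩
  have hnd : (l0 :: t).Nodup := ht ▸ PySem.List.nodup_dedup _
  have hl0t : l0 ∉ t := (List.nodup_cons.mp hnd).1
  have hmem : s ∈ l0 :: t := ht ▸ (PySem.List.mem_dedup _ _).mpr hs
  rw [ht]
  have hofl : ∀ (ps : List (String × String)),
      PySem.Dict.ofList ps = ps.foldl (fun d p => d.insert p.1 p.2) PySem.Dict.empty :=
    fun ps => rfl
  simp only [List.length_cons, Nat.add_sub_cancel, List.zip_cons_cons, hofl, List.foldl_cons]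
  by_cases hseq : s = l0
  · subst hseq
    rw [getD_foldl_insert_of_not_key _ _ _ _ (by
        intro p hp
        have : p.1 ∈ t := (List.of_mem_zip hp).1
        exact fun h => hl0t (h ▸ this)),
      PySem.Dict.getD_insert_self]
    simp
  · have hst : s ∈ t := by
      rcases List.mem_cons.mp hmem with h | h; exact absurd h hseq; exact h
    rw [getD_foldl_zip_replicate _ _ _ _ hst]
    simp [hseq]

theorem mapB_eq_canon (s0 : List (String × String)) (rest : List (List (String × String))) :
    map_speakers_alt (s0 :: rest) = (s0 :: rest).map (canonSeg (labelOfB s0)) := by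
  have key : ∀ seg ∈ s0 :: rest,
      ((PySem.Dict.ofList seg).insert "speaker_label"
        ((PySem.Dict.ofList ((PySem.List.dedup ((s0 :: rest).map labelOfB)).zip
          ("KONSULTANT" :: List.replicate
            ((PySem.List.dedup ((s0 :: rest).map labelOfB)).length - 1) "KLIENT"))).getD
          (labelOfB seg) "")).items
      = canonSeg (labelOfB s0) seg := by
    intro seg hseg
    have hlab : labelOfB seg ∈ (s0 :: rest).map labelOfB := List.mem_map_of_mem hseg
    rw [List.map_cons] at hlab ⊢
    rw [table_getD _ _ _ hlab, canonSeg]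
  exact List.map_congr_left key

-- ===== VERDICT (by name: the statement is the Claim_ definition above) =====
theorem map_speakers_spec : Claim_equal_map_speakers := by
  intro segments _ _
  unfold Spec_map_speakers
  match segments with
  | [] => rfl
  | s0 :: rest => rw [mapA_eq_canon, mapB_eq_canon]
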